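-- pv_equiv track=rewrite | github.com/OlaszPL/Introduction_to_computer_science_course | Kolokwia 3/zad_A5_2023.py | rotate_up
-- ===== SOURCE A (Python) =====
-- def rotate_up(T, c):
--     n = len(T)
--     i = 1
--     tmp = T[0][c]
--     while n - i > -1:
--         T[n - i][c], tmp = tmp, T[n - i][c]
--         i += 1
--
--     return T
-- ===== SOURCE B (Python) =====
-- # B: extract the column, rotate it up by slicing, write it back (same in-place
-- # mutation of T's rows as A); simpler decomposition than A's swap cascade.
-- def rotate_up(T, c):
--     col = [row[c] for row in T]
--     rotated = col[1:] + col[:1]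
--     for row, v in zip(T, rotated):
--         row[c] = v
--     return T
-- ===== Notes on version B (the rewrite author's own statement) =====
-- stated objective: simpler
-- what changed: Replaces A's bottom-to-top swap cascade carrying a tmp variable with a three-step decomposition: read the column out, rotate it by slicing, write it back.
import Mathlib
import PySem

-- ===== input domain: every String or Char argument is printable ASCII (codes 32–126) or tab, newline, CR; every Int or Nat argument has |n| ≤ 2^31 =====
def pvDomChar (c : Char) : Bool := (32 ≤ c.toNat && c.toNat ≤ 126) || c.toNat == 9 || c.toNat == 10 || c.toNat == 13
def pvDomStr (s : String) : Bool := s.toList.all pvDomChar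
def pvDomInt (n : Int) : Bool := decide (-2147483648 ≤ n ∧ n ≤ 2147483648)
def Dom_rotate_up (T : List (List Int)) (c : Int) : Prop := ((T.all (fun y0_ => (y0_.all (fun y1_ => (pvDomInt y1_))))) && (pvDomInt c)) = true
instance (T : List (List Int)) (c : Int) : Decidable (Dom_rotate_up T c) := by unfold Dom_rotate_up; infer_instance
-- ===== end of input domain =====

-- B rotates the chosen column up by one via extract / slice-rotate / write-back instead of
-- A's swap cascade; equivalence is about the RETURN value (both Pythons also mutate T's rows in place).

-- ===== PORT A =====
-- T[j][c] (j a valid Nat row index, c a Python int column index); 0-default junk outside Pre_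
def pvRowGetC (T : List (List Int)) (j : Nat) (c : Int) : Int :=
  PySem.List.pyGetD (T.getD j []) c 0

-- T[j][c] = v; unchanged-row junk outside Pre_
def pvRowSetC (T : List (List Int)) (j : Nat) (c : Int) (v : Int) : List (List Int) :=
  T.modify j (fun row => PySem.List.pySetD row c v)

-- the while loop: k = remaining iterations = n - i + 1; current row index = k - 1
def pvRotateLoop (c : Int) : Nat → List (List Int) → Int → List (List Int)
  | 0, T, _ => T
  | k + 1, T, tmp => pvRotateLoop c k (pvRowSetC T k c tmp) (pvRowGetC T k c)

def rotate_up (T : List (List Int)) (c : Int) : List (List Int) :=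
  let tmp := pvRowGetC T 0 c
  pvRotateLoop c T.length T tmp

-- ===== PORT B =====
def rotate_up_alt (T : List (List Int)) (c : Int) : List (List Int) :=
  let col := T.map (fun row => PySem.List.pyGetD row c 0)
  let rotated := col.drop 1 ++ col.take 1
  (T.zip rotated).map (fun rv => PySem.List.pySetD rv.1 c rv.2)

-- ===== PRECONDITION & SPEC =====
-- A raises IndexError on an empty matrix (T[0][c]) and whenever c is out of range for some row.
def Pre_rotate_up (T : List (List Int)) (c : Int) : Prop :=
  T ≠ [] ∧ ∀ row ∈ T, PySem.Raise.InRange row.length c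
instance (T : List (List Int)) (c : Int) : Decidable (Pre_rotate_up T c) := by
  unfold Pre_rotate_up; infer_instance
def pvWitness_rotate_up : List (List Int) × Int := ([[1, 2], [3, 4], [5, 6]], 0)

def Spec_rotate_up (T : List (List Int)) (c : Int) (out : List (List Int)) : Prop := out = rotate_up_alt T c
instance (T : List (List Int)) (c : Int) (out : List (List Int)) : Decidable (Spec_rotate_up T c out) := by unfold Spec_rotate_up; infer_instance

-- ===== CLAIM (what is proved, stated in full; the proofs are below) =====
def Claim_equal_rotate_up : Prop := ∀ (T : List (List Int)) (c : Int), Dom_rotate_up T c → Pre_rotate_up T c → Spec_rotate_up T c (rotate_up T c)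

-- ===== LEMMAS AND PROOFS =====
theorem pv_modify_append_cons (A : List (List Int)) (a : List Int) (suf : List (List Int))
    (f : List Int → List Int) : (A ++ a :: suf).modify A.length f = A ++ f a :: suf := by
  induction A with
  | nil => simp
  | cons b A ih => simpa using ih

theorem pv_getD_append_cons (A : List (List Int)) (a : List Int) (suf : List (List Int)) :
    (A ++ a :: suf).getD A.length [] = a := by
  induction A with
  | nil => rfl
  | cons b A ih => simpa using ih

-- the swap cascade over rows (pre), processed from the last row downwards, writes the
-- up-shifted column of pre with tmp in the last slot
theorem pv_loop_eq (c : Int) (pre : List (List Int)) : ∀ (suf : List (List Int)) (tmp : Int),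
    pvRotateLoop c pre.length (pre ++ suf) tmp =
      ((pre.zip ((pre.map (fun row => PySem.List.pyGetD row c 0)).drop 1 ++ [tmp])).map
        (fun rv => PySem.List.pySetD rv.1 c rv.2)) ++ suf := by
  induction pre using List.reverseRecOn with
  | nil => intro suf tmp; simp [pvRotateLoop]
  | append_singleton A a ih =>
    intro suf tmp
    have hlen : (A ++ [a]).length = A.length + 1 := by simp
    rw [hlen]
    show pvRotateLoop c A.length
        (pvRowSetC ((A ++ [a]) ++ suf) A.length c tmp)
        (pvRowGetC ((A ++ [a]) ++ suf) A.length c) = _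
    have hset : pvRowSetC ((A ++ [a]) ++ suf) A.length c tmp
        = A ++ (PySem.List.pySetD a c tmp) :: suf := by
      simpa [pvRowSetC] using pv_modify_append_cons A a suf (fun row => PySem.List.pySetD row c tmp)
    have hget : pvRowGetC ((A ++ [a]) ++ suf) A.length c = PySem.List.pyGetD a c 0 := by
      simp only [pvRowGetC, List.append_assoc, List.cons_append, List.nil_append]
      rw [pv_getD_append_cons]
    rw [hset, hget, ih]
    cases A with
    | nil => simp
    | cons b A' =>
      rw [List.zip_append (by simp)]
      simp

theorem rotate_up_eq (T : List (List Int)) (c : Int) :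
    rotate_up T c =
      (T.zip ((T.map (fun row => PySem.List.pyGetD row c 0)).drop 1 ++ [pvRowGetC T 0 c])).map
        (fun rv => PySem.List.pySetD rv.1 c rv.2) := by
  have := pv_loop_eq c T [] (pvRowGetC T 0 c)
  simpa [rotate_up] using this

-- ===== VERDICT (by name: the statement is the Claim_ definition above) =====
theorem rotate_up_spec : Claim_equal_rotate_up := by
  intro T c _hdom hpre
  obtain ⟨hne, -⟩ := hpre
  cases T with
  | nil => exact absurd rfl hne
  | cons x xs =>
    show rotate_up (x :: xs) c = rotate_up_alt (x :: xs) c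
    rw [rotate_up_eq]
    simp [rotate_up_alt, pvRowGetC]
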